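-- pv_equiv track=rewrite | github.com/Temirlaaan/prods-z-n-datastore | app/zabbix_client.py | get_host_primary_ip
-- ===== SOURCE A (Python) =====
-- from typing import Optional
--
-- def get_host_primary_ip(host: dict) -> Optional[str]:
--     """
--     Извлечение основного IP адреса хоста.
--
--     Args:
--         host: Данные хоста из Zabbix.
--
--     Returns:
--         IP адрес или None.
--     """
--     interfaces = host.get("interfaces", [])
--
--     # Ищем main interface типа agent (type=1)
--     for iface in interfaces:
--         if iface.get("main") == "1" and iface.get("type") == "1":
--             return iface.get("ip")
--
--     # Если нет agent, берём любой main interface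
--     for iface in interfaces:
--         if iface.get("main") == "1":
--             return iface.get("ip")
--
--     # Берём первый доступный
--     if interfaces:
--         return interfaces[0].get("ip")
--
--     return None
-- ===== SOURCE B (Python) =====
-- from typing import Optional
--
-- def get_host_primary_ip(host: dict) -> Optional[str]:
--     """Single pass over the interfaces, tracking fallbacks as we go."""
--     seen_main = False
--     fallback_main = None
--     seen_any = False
--     fallback_any = None
--     for iface in host.get("interfaces", []):
--         if iface.get("main") == "1":
--             if iface.get("type") == "1":
--                 return iface.get("ip")
--             if not seen_main:
--                 seen_main = True
--                 fallback_main = iface.get("ip")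
--         if not seen_any:
--             seen_any = True
--             fallback_any = iface.get("ip")
--     return fallback_main if seen_main else fallback_any
-- ===== Notes on version B (the rewrite author's own statement) =====
-- stated objective: simpler
-- what changed: Replaces A's three sequential scans of the interface list (agent-main scan, main scan, first element) with a single pass that returns at the first agent main interface and otherwise remembers the first main ip and the first ip as fallbacks.
import Mathlib
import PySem

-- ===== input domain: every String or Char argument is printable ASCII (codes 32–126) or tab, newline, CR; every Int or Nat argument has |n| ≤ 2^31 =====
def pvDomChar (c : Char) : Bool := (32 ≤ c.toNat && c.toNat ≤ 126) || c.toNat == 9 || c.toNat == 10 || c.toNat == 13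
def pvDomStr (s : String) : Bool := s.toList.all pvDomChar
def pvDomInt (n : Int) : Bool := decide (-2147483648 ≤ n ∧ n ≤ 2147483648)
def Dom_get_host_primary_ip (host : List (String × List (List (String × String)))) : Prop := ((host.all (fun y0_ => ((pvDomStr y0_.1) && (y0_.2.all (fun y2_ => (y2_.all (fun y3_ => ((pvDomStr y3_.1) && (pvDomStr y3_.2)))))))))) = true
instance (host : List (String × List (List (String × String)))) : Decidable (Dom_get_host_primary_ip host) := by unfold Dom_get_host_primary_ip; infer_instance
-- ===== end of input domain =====

-- B changes A's three sequential scans into one pass with remembered fallbacks (objective: simpler).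

-- ===== PORT A =====
-- iface.get(k): first-match lookup in the association list (Python dict .get)
def pvGet (d : List (String × String)) (k : String) : Option String :=
  (PySem.Dict.mk d).get? k

-- first loop: 'return iface.get("ip")' when main=="1" and type=="1"; some r = returned r
def pvScanAgent : List (List (String × String)) → Option (Option String)
  | [] => none
  | i :: rest =>
    if pvGet i "main" == some "1" && pvGet i "type" == some "1" then some (pvGet i "ip")
    else pvScanAgent rest

-- second loop: 'return iface.get("ip")' when main=="1"
def pvScanMain : List (List (String × String)) → Option (Option String)
  | [] => none
  | i :: rest =>
    if pvGet i "main" == some "1" then some (pvGet i "ip")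
    else pvScanMain rest

def get_host_primary_ip (host : List (String × List (List (String × String)))) : Option String :=
  let interfaces := (PySem.Dict.mk host).getD "interfaces" []
  match pvScanAgent interfaces with
  | some r => r
  | none =>
    match pvScanMain interfaces with
    | some r => r
    | none =>
      match interfaces with
      | [] => none
      | i :: _ => pvGet i "ip"

-- ===== PORT B =====
-- single pass, state = (seen_main, fallback_main, seen_any, fallback_any)
def pvOnePass : List (List (String × String)) → Bool → Option String → Bool → Option String → Option String
  | [], seenMain, fbMain, _, fbAny => if seenMain then fbMain else fbAny
  | i :: rest, seenMain, fbMain, seenAny, fbAny =>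
    if pvGet i "main" == some "1" then
      if pvGet i "type" == some "1" then pvGet i "ip"
      else
        let seenMain' := true
        let fbMain' := if seenMain then fbMain else pvGet i "ip"
        let fbAny' := if seenAny then fbAny else pvGet i "ip"
        pvOnePass rest seenMain' fbMain' true fbAny'
    else
      let fbAny' := if seenAny then fbAny else pvGet i "ip"
      pvOnePass rest seenMain fbMain true fbAny'

def get_host_primary_ip_alt (host : List (String × List (List (String × String)))) : Option String :=
  pvOnePass ((PySem.Dict.mk host).getD "interfaces" []) false none false none

-- ===== PRECONDITION & SPEC =====
def Spec_get_host_primary_ip (host : List (String × List (List (String × String)))) (out : Option String) : Prop := out = get_host_primary_ip_alt host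
instance (host : List (String × List (List (String × String)))) (out : Option String) : Decidable (Spec_get_host_primary_ip host out) := by unfold Spec_get_host_primary_ip; infer_instance

-- ===== CLAIM (what is proved, stated in full; the proofs are below) =====
def Claim_equal_get_host_primary_ip : Prop := ∀ (host : List (String × List (List (String × String)))), Dom_get_host_primary_ip host → Spec_get_host_primary_ip host (get_host_primary_ip host)

-- ===== LEMMAS AND PROOFS =====

-- Invariant of B's single pass, relating it to A's three scans for any reachable state.
theorem pvOnePass_eq (l : List (List (String × String))) :
    ∀ (seenMain : Bool) (fbMain : Option String) (seenAny : Bool) (fbAny : Option String),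
    (seenAny = false → fbAny = none) →
    pvOnePass l seenMain fbMain seenAny fbAny =
      match pvScanAgent l with
      | some r => r
      | none =>
        if seenMain then fbMain
        else
          match pvScanMain l with
          | some r => r
          | none =>
            if seenAny then fbAny
            else match l with
                 | [] => none
                 | i :: _ => pvGet i "ip" := by
  induction l with
  | nil =>
    intro sm fm sa fa hfa
    cases sm <;> cases sa <;> simp_all [pvOnePass, pvScanAgent, pvScanMain]
  | cons i rest ih =>
    intro sm fm sa fa hfa
    by_cases hm : pvGet i "main" = some "1"
    · by_cases ht : pvGet i "type" = some "1"
      · simp [pvOnePass, pvScanAgent, hm, ht]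
      · rw [show pvOnePass (i :: rest) sm fm sa fa =
              pvOnePass rest true (if sm then fm else pvGet i "ip") true
                (if sa then fa else pvGet i "ip") by simp [pvOnePass, hm, ht]]
        rw [ih _ _ _ _ (by simp)]
        cases hA : pvScanAgent rest <;>
          simp [pvScanAgent, pvScanMain, hm, ht, hA]
    · rw [show pvOnePass (i :: rest) sm fm sa fa =
            pvOnePass rest sm fm true (if sa then fa else pvGet i "ip") by
              simp [pvOnePass, hm]]
      rw [ih _ _ _ _ (by simp)]
      cases hA : pvScanAgent rest <;> cases hM : pvScanMain rest <;>
        simp [pvScanAgent, pvScanMain, hm, hA, hM]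

-- ===== VERDICT (by name: the statement is the Claim_ definition above) =====
theorem get_host_primary_ip_spec : Claim_equal_get_host_primary_ip := by
  intro host _
  unfold Spec_get_host_primary_ip get_host_primary_ip get_host_primary_ip_alt
  rw [pvOnePass_eq _ _ _ _ _ (fun _ => rfl)]
  simp
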